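-- pv_equiv track=rewrite | github.com/sorrowscry86/voidcat-reasoning-core | multi_format_processor.py | _section_based_chunks
-- ===== SOURCE A (Python) =====
-- from typing import Any, Dict, List, Optional, Tuple, Union
--
-- def _section_based_chunks(
--     content: str, max_chunk_size: int = 1000
-- ) -> List[str]:
--     """
--     Chunk content based on sections (headings).
--
--     Args:
--         content: Document content
--         max_chunk_size: Maximum chunk size in characters
--
--     Returns:
--         List of content chunks
--     """
--     lines = content.split("\n")
--     chunks = []
--     current_chunk = []
--     current_size = 0
--
--     for line in lines:
--         # Start a new chunk on headings
--         if line.startswith("# ") or line.startswith("## "):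
--             if current_chunk:
--                 chunks.append("\n".join(current_chunk))
--                 current_chunk = []
--                 current_size = 0
--
--         current_chunk.append(line)
--         current_size += len(line)
--
--         # Split if chunk gets too large
--         if current_size >= max_chunk_size:
--             chunks.append("\n".join(current_chunk))
--             current_chunk = []
--             current_size = 0
--
--     # Add the last chunk if not empty
--     if current_chunk:
--         chunks.append("\n".join(current_chunk))
--
--     return chunks
-- ===== SOURCE B (Python) =====
-- from typing import List
--
--
-- def _chunk_section(lines, max_chunk_size):
--     """Size-accumulating chunker for one section's lines."""
--     chunks = []
--     acc = []
--     size = 0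
--     for line in lines:
--         acc.append(line)
--         size += len(line)
--         if size >= max_chunk_size:
--             chunks.append("\n".join(acc))
--             acc = []
--             size = 0
--     if acc:
--         chunks.append("\n".join(acc))
--     return chunks
--
--
-- def _section_based_chunks(
--     content: str, max_chunk_size: int = 1000
-- ) -> List[str]:
--     # Phase 1: partition the lines into sections, cutting at headings.
--     sections = [[]]
--     for line in content.split("\n"):
--         if line.startswith("# ") or line.startswith("## "):
--             sections.append([])
--         sections[-1].append(line)
--     # Phase 2: chunk each section independently by size.
--     out = []
--     for sec in sections:
--         out.extend(_chunk_section(sec, max_chunk_size))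
--     return out
-- ===== Notes on version B (the rewrite author's own statement) =====
-- stated objective: alternative
-- what changed: Replaces A's single stateful loop (flush-at-heading interleaved with flush-at-size) by a two-phase decomposition: first partition the lines into heading-delimited sections, then run a plain size-accumulating chunker on each section independently and concatenate.
import Mathlib
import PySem

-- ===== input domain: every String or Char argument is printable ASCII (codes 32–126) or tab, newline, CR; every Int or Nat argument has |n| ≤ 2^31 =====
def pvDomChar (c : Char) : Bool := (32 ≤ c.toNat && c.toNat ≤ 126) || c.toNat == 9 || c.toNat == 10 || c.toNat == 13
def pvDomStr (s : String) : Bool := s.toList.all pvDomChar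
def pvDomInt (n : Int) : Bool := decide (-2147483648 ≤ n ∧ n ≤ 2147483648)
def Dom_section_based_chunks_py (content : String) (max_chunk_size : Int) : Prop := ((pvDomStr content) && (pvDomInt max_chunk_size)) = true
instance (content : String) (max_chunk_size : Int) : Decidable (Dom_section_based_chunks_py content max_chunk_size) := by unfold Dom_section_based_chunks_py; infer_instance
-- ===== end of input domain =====

-- B changes the decomposition (two phases: split lines into heading sections, then size-chunk each section); same cost, same output.

-- ===== PORT A =====
-- a line starts a new chunk if it starts with "# " or "## "
def pvIsHead (line : String) : Bool :=
  PySem.Str.startswith line "# " || PySem.Str.startswith line "## "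

-- loop body of A: state = (chunks, current_chunk, current_size)
def pvStepA (max_chunk_size : Int) (st : List String × List String × Int) (line : String) :
    List String × List String × Int :=
  let chunks := st.1
  let cur := st.2.1
  let size := st.2.2
  -- start a new chunk on headings (only flushes when current_chunk is nonempty)
  let st1 :=
    if pvIsHead line && !cur.isEmpty then
      (chunks ++ [PySem.Str.join "\n" cur], ([] : List String), (0 : Int))
    else (chunks, cur, size)
  let cur1 := st1.2.1 ++ [line]
  let size1 := st1.2.2 + PySem.Str.len line
  -- split if chunk gets too large
  if size1 ≥ max_chunk_size then (st1.1 ++ [PySem.Str.join "\n" cur1], [], 0)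
  else (st1.1, cur1, size1)

-- final step of A: add the last chunk if not empty
def pvFinA (st : List String × List String × Int) : List String :=
  if st.2.1.isEmpty then st.1 else st.1 ++ [PySem.Str.join "\n" st.2.1]

def section_based_chunks_py (content : String) (max_chunk_size : Int) : List String :=
  -- split? never returns none for the nonempty separator "\n"
  let lines := (PySem.Str.split? content "\n").getD []
  pvFinA (lines.foldl (pvStepA max_chunk_size) ([], [], 0))

-- ===== PORT B =====
-- Phase 1: partition the lines into sections, cutting at headings.  Returns
-- (leading section before the first heading, the heading-started sections).
def pvSplitSections : List String → List String × List (List String)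
  | [] => ([], [])
  | l :: rest =>
    let r := pvSplitSections rest
    if pvIsHead l then ([], (l :: r.1) :: r.2)
    else (l :: r.1, r.2)

-- Phase 2: size-accumulating chunker for one section's lines
def pvChunkSection (max_chunk_size : Int) (acc : List String) (size : Int) :
    List String → List String
  | [] => if acc.isEmpty then [] else [PySem.Str.join "\n" acc]
  | l :: rest =>
    let acc1 := acc ++ [l]
    let size1 := size + PySem.Str.len l
    if size1 ≥ max_chunk_size then
      PySem.Str.join "\n" acc1 :: pvChunkSection max_chunk_size [] 0 rest
    else pvChunkSection max_chunk_size acc1 size1 rest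

def section_based_chunks_py_alt (content : String) (max_chunk_size : Int) : List String :=
  let lines := (PySem.Str.split? content "\n").getD []
  let secs := pvSplitSections lines
  (secs.1 :: secs.2).flatMap (pvChunkSection max_chunk_size [] 0)

-- ===== PRECONDITION & SPEC =====
def Spec_section_based_chunks_py (content : String) (max_chunk_size : Int) (out : List String) : Prop := out = section_based_chunks_py_alt content max_chunk_size
instance (content : String) (max_chunk_size : Int) (out : List String) : Decidable (Spec_section_based_chunks_py content max_chunk_size out) := by unfold Spec_section_based_chunks_py; infer_instance

-- ===== CLAIM (what is proved, stated in full; the proofs are below) =====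
def Claim_equal_section_based_chunks_py : Prop := ∀ (content : String) (max_chunk_size : Int), Dom_section_based_chunks_py content max_chunk_size → Spec_section_based_chunks_py content max_chunk_size (section_based_chunks_py content max_chunk_size)

-- ===== LEMMAS AND PROOFS =====

-- intermediate recursive description of A's loop (remaining lines, given current chunk and size)
def pvGo (max_chunk_size : Int) (cur : List String) (size : Int) : List String → List String
  | [] => if cur.isEmpty then [] else [PySem.Str.join "\n" cur]
  | l :: rest =>
    let pre : List String := if pvIsHead l && !cur.isEmpty then [PySem.Str.join "\n" cur] else []
    let cur0 := if pvIsHead l && !cur.isEmpty then [] else cur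
    let size0 := if pvIsHead l && !cur.isEmpty then 0 else size
    let cur1 := cur0 ++ [l]
    let size1 := size0 + PySem.Str.len l
    pre ++ (if size1 ≥ max_chunk_size then PySem.Str.join "\n" cur1 :: pvGo max_chunk_size [] 0 rest
            else pvGo max_chunk_size cur1 size1 rest)

-- A's fold, finalized, equals pvGo prefixed by the already-emitted chunks
theorem pvGo_eq_foldA (max : Int) (lines : List String) :
    ∀ (chunks cur : List String) (size : Int),
      pvFinA (lines.foldl (pvStepA max) (chunks, cur, size))
      = chunks ++ pvGo max cur size lines := by
  induction lines with
  | nil =>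
    intro chunks cur size
    simp only [List.foldl_nil, pvGo, pvFinA]
    split <;> simp
  | cons l rest ih =>
    intro chunks cur size
    simp only [List.foldl_cons, pvGo, pvStepA]
    by_cases h : (pvIsHead l && !cur.isEmpty) = true <;>
      simp only [h, Bool.false_eq_true, if_true, if_false, List.nil_append] <;>
      split <;> rw [ih] <;> simp [List.append_assoc]

-- pvGo equals B's per-section chunking (invariant: empty current chunk ⇒ zero size)
theorem pvGo_eq_sections (max : Int) (lines : List String) :
    ∀ (cur : List String) (size : Int), (cur = [] → size = 0) →
      pvGo max cur size lines
      = pvChunkSection max cur size (pvSplitSections lines).1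
        ++ (pvSplitSections lines).2.flatMap (pvChunkSection max [] 0) := by
  induction lines with
  | nil =>
    intro cur size _
    simp only [pvGo, pvSplitSections, pvChunkSection, List.flatMap_nil, List.append_nil]
  | cons l rest ih =>
    intro cur size h
    by_cases hh : pvIsHead l = true
    · by_cases hc : cur.isEmpty = true
      · -- heading line, current chunk empty: no flush; l opens the new section
        have hcur : cur = [] := List.isEmpty_iff.mp hc
        have hs := h hcur
        subst hcur; subst hs
        simp only [pvGo, pvSplitSections, hh, if_true, List.isEmpty_nil, Bool.not_true,
          Bool.and_false, Bool.false_eq_true, if_false, List.nil_append, List.flatMap_cons,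
          pvChunkSection]
        split
        · rw [ih [] 0 (fun _ => rfl)]; simp
        · rw [ih [l] (0 + PySem.Str.len l) (by simp)]
      · -- heading line, current chunk nonempty: flush it, l opens the new section
        have hnc : (!cur.isEmpty) = true := by simp [hc]
        have hfin : pvChunkSection max cur size [] = [PySem.Str.join "\n" cur] := by
          simp only [pvChunkSection]; rw [if_neg hc]
        simp only [pvGo, pvSplitSections, hh, Bool.true_and, hnc, if_true,
          List.flatMap_cons, hfin]
        congr 1
        simp only [pvChunkSection, List.nil_append]
        by_cases hs : 0 + PySem.Str.len l ≥ max
        · rw [if_pos hs, if_pos hs, ih [] 0 (fun _ => rfl)]; simp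
        · rw [if_neg hs, if_neg hs, ih [l] (0 + PySem.Str.len l) (by simp)]
    · -- not a heading: l joins the current section
      have hf : pvIsHead l = false := by simpa using hh
      simp only [pvGo, pvSplitSections, hf, Bool.false_and, Bool.false_eq_true, if_false,
        List.nil_append, pvChunkSection]
      by_cases hs : size + PySem.Str.len l ≥ max
      · rw [if_pos hs, if_pos hs, ih [] 0 (fun _ => rfl)]; simp
      · rw [if_neg hs, if_neg hs, ih (cur ++ [l]) (size + PySem.Str.len l) (by simp)]

-- ===== VERDICT (by name: the statement is the Claim_ definition above) =====
theorem section_based_chunks_py_spec : Claim_equal_section_based_chunks_py := by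
  intro content max _
  unfold Spec_section_based_chunks_py section_based_chunks_py section_based_chunks_py_alt
  rw [pvGo_eq_foldA max _ [] [] 0, pvGo_eq_sections max _ [] 0 (fun _ => rfl)]
  simp [List.flatMap_cons]
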